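-- pv_equiv track=rewrite | github.com/airhao3/echosub-open | backend/app/services/semantic_service.py | _find_next_split_point
-- ===== SOURCE A (Python) =====
-- def _find_next_split_point(text: str, start_pos: int, max_length: int) -> int:
--     """
--     Helper method to find the next good split point in the text.
--
--     Args:
--         text: The full text to search in
--         start_pos: Position to start searching from
--         max_length: Maximum length to search before forcing a split
--
--     Returns:
--         Position of the next split point, or -1 if no good split found
--     """
--     # Calculate the end position for this segment
--     end_pos = min(start_pos + max_length, len(text))
--
--     # If we're at the end of the text, return that position
--     if start_pos >= end_pos:
--         return start_pos
--
--     # First try to find a sentence boundary (., !, ? followed by space)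
--     for i in range(min(end_pos, len(text) - 1), start_pos, -1):
--         if text[i] in '.!?' and i + 1 < len(text) and text[i+1].isspace():
--             return i + 1  # Split after the punctuation
--
--     # Then try to find a clause boundary (comma, semicolon, colon)
--     for i in range(min(end_pos, len(text) - 1), start_pos, -1):
--         if text[i] in ',;:' and (i + 1 >= len(text) or text[i+1].isspace()):
--             return i + 1  # Split after the punctuation
--
--     # Then try to find a word boundary (whitespace)
--     for i in range(min(end_pos, len(text) - 1), start_pos, -1):
--         if text[i].isspace():
--             return i + 1  # Split after the whitespace
--
--     # If no good split point found, return -1 to indicate no split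
--     return -1
-- ===== SOURCE B (Python) =====
-- def _find_next_split_point(text: str, start_pos: int, max_length: int) -> int:
--     # One backward pass recording the rightmost hit of each tier, instead of three scans.
--     end_pos = min(start_pos + max_length, len(text))
--     if start_pos >= end_pos:
--         return start_pos
--     best_sentence = None
--     best_clause = None
--     best_word = None
--     for i in range(min(end_pos, len(text) - 1), start_pos, -1):
--         if best_sentence is None and text[i] in '.!?' and i + 1 < len(text) and text[i+1].isspace():
--             best_sentence = i
--         if best_clause is None and text[i] in ',;:' and (i + 1 >= len(text) or text[i+1].isspace()):
--             best_clause = i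
--         if best_word is None and text[i].isspace():
--             best_word = i
--     if best_sentence is not None:
--         return best_sentence + 1
--     if best_clause is not None:
--         return best_clause + 1
--     if best_word is not None:
--         return best_word + 1
--     return -1
-- ===== Notes on version B (the rewrite author's own statement) =====
-- stated objective: alternative
-- what changed: Replaces A's three separate backward scans (sentence, then clause, then word tier) by a single backward pass that records the rightmost hit of each tier in three accumulators and picks by tier priority at the end.
-- outside the precondition, e.g. on _find_next_split_point('a. b', -10, 20): A returns 2, B raises IndexError
import Mathlib
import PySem

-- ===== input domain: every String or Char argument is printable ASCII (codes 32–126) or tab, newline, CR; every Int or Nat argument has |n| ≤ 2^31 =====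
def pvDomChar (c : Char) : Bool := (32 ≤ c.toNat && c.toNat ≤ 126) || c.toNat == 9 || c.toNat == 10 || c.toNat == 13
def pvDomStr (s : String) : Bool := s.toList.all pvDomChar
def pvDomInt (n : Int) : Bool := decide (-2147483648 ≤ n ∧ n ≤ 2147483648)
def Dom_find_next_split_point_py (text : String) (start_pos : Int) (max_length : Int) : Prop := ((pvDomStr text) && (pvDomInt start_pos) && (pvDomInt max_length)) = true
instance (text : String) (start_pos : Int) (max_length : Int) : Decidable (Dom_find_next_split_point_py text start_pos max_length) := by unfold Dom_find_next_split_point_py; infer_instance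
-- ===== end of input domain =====

-- B does ONE backward pass recording the rightmost hit of each tier, instead of A's three backward scans (alternative decomposition, same cost class).
-- Shared tier predicates (identical character tests in both Pythons); text[i] via pyGet?, the NUL default is only
-- reached where Python raises IndexError (excluded by Pre_) and never satisfies any predicate.

-- ===== PORT A =====
def pvCharAt (cs : List Char) (i : Int) : Char := (PySem.List.pyGet? cs i).getD (Char.ofNat 0)

def pvIsSent (cs : List Char) (i : Int) : Bool :=
  ['.', '!', '?'].contains (pvCharAt cs i) && decide (i + 1 < (cs.length : Int)) && PySem.Chars.isspace (pvCharAt cs (i + 1))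

def pvIsClause (cs : List Char) (i : Int) : Bool :=
  [',', ';', ':'].contains (pvCharAt cs i) && (decide ((cs.length : Int) ≤ i + 1) || PySem.Chars.isspace (pvCharAt cs (i + 1)))

def pvIsWord (cs : List Char) (i : Int) : Bool := PySem.Chars.isspace (pvCharAt cs i)

def find_next_split_point_py (text : String) (start_pos : Int) (max_length : Int) : Int :=
  let cs := text.toList
  let n : Int := cs.length
  let end_pos := min (start_pos + max_length) n
  if start_pos ≥ end_pos then start_pos
  else
    let idxs := PySem.List.pyRange (min end_pos (n - 1)) start_pos (-1)
    match idxs.findSome? (fun i => if pvIsSent cs i then some (i + 1) else none) with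
    | some r => r
    | none =>
      match idxs.findSome? (fun i => if pvIsClause cs i then some (i + 1) else none) with
      | some r => r
      | none =>
        match idxs.findSome? (fun i => if pvIsWord cs i then some (i + 1) else none) with
        | some r => r
        | none => -1

-- ===== PORT B =====
def pvStepB (cs : List Char) (acc : Option Int × Option Int × Option Int) (i : Int) :
    Option Int × Option Int × Option Int :=
  (if acc.1.isNone && pvIsSent cs i then some i else acc.1,
   if acc.2.1.isNone && pvIsClause cs i then some i else acc.2.1,
   if acc.2.2.isNone && pvIsWord cs i then some i else acc.2.2)

def find_next_split_point_py_alt (text : String) (start_pos : Int) (max_length : Int) : Int :=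
  let cs := text.toList
  let n : Int := cs.length
  let end_pos := min (start_pos + max_length) n
  if start_pos ≥ end_pos then start_pos
  else
    let idxs := PySem.List.pyRange (min end_pos (n - 1)) start_pos (-1)
    match idxs.foldl (pvStepB cs) (none, none, none) with
    | (some i, _, _) => i + 1
    | (none, some i, _) => i + 1
    | (none, none, some i) => i + 1
    | (none, none, none) => -1

-- ===== PRECONDITION & SPEC =====
-- Pre_ excludes start_pos below -len(text) when the search window is nonempty: there A's scans read characters by
-- negative-index wraparound and raise IndexError unless a split is found first (B, scanning the whole window, raises).
def Pre_find_next_split_point_py (text : String) (start_pos : Int) (max_length : Int) : Prop :=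
  start_pos < min (start_pos + max_length) (PySem.Str.len text) → -(PySem.Str.len text) ≤ start_pos
instance (text : String) (start_pos : Int) (max_length : Int) : Decidable (Pre_find_next_split_point_py text start_pos max_length) := by unfold Pre_find_next_split_point_py; infer_instance
def pvWitness_find_next_split_point_py : String × Int × Int := ("ab cd", 0, 4)

def Spec_find_next_split_point_py (text : String) (start_pos : Int) (max_length : Int) (out : Int) : Prop := out = find_next_split_point_py_alt text start_pos max_length
instance (text : String) (start_pos : Int) (max_length : Int) (out : Int) : Decidable (Spec_find_next_split_point_py text start_pos max_length out) := by unfold Spec_find_next_split_point_py; infer_instance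

-- ===== CLAIM (what is proved, stated in full; the proofs are below) =====
def Claim_equal_find_next_split_point_py : Prop := ∀ (text : String) (start_pos : Int) (max_length : Int), Dom_find_next_split_point_py text start_pos max_length → Pre_find_next_split_point_py text start_pos max_length → Spec_find_next_split_point_py text start_pos max_length (find_next_split_point_py text start_pos max_length)

-- ===== LEMMAS AND PROOFS =====

-- A's "for … return i+1" pass is the first match, shifted by one.
theorem pvFindSome_map (p : Int → Bool) (L : List Int) :
    L.findSome? (fun i => if p i then some (i + 1) else none) = (L.find? p).map (· + 1) := by
  induction L with
  | nil => simp
  | cons x xs ih => by_cases h : p x <;> simp [h, ih]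

theorem pvOrStep (a : Option Int) (p : Int → Bool) (x : Int) (r : Option Int) :
    (if a.isNone && p x then some x else a).or r = a.or (if p x then some x else r) := by
  cases a <;> by_cases h : p x <;> simp [h]

-- B's single fold computes the first match of each tier simultaneously.
theorem pvFold3 (cs : List Char) (L : List Int) (a b c : Option Int) :
    L.foldl (pvStepB cs) (a, b, c) =
      (a.or (L.find? (pvIsSent cs)), b.or (L.find? (pvIsClause cs)), c.or (L.find? (pvIsWord cs))) := by
  induction L generalizing a b c with
  | nil => simp
  | cons x xs ih =>
    rw [List.foldl_cons, pvStepB, ih]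
    refine Prod.ext ?_ (Prod.ext ?_ ?_) <;> simp only [List.find?_cons] <;> rw [pvOrStep] <;>
      first
      | (cases pvIsSent cs x <;> simp)
      | (cases pvIsClause cs x <;> simp)
      | (cases pvIsWord cs x <;> simp)

theorem find_next_split_point_py_eq_alt (text : String) (start_pos max_length : Int) :
    find_next_split_point_py text start_pos max_length = find_next_split_point_py_alt text start_pos max_length := by
  unfold find_next_split_point_py find_next_split_point_py_alt
  by_cases hg : start_pos ≥ min (start_pos + max_length) ((text.toList.length : Int))
  · rw [if_pos hg, if_pos hg]
  · simp only [if_neg hg, pvFold3, pvFindSome_map]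
    rcases h1 : (PySem.List.pyRange (min (min (start_pos + max_length) ((text.toList.length : Int))) ((text.toList.length : Int) - 1)) start_pos (-1)).find? (pvIsSent text.toList) with _ | i <;>
    rcases h2 : (PySem.List.pyRange (min (min (start_pos + max_length) ((text.toList.length : Int))) ((text.toList.length : Int) - 1)) start_pos (-1)).find? (pvIsClause text.toList) with _ | j <;>
    rcases h3 : (PySem.List.pyRange (min (min (start_pos + max_length) ((text.toList.length : Int))) ((text.toList.length : Int) - 1)) start_pos (-1)).find? (pvIsWord text.toList) with _ | k <;>
      simp

-- ===== VERDICT (by name: the statement is the Claim_ definition above) =====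
theorem find_next_split_point_py_spec : Claim_equal_find_next_split_point_py := by
  intro text start_pos max_length _ _
  unfold Spec_find_next_split_point_py
  exact find_next_split_point_py_eq_alt text start_pos max_length
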